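-- pv_equiv track=rewrite | github.com/emilszymecki/cert_robocorp_filler | libs.py | find_data_by_questions
-- ===== SOURCE A (Python) =====
-- def find_data_by_questions(arr_q,data):
--     temp = []
--     for el in data:
--         responses_text = []
--         for r_el in el["response"]:
--             responses_text.append(r_el["text"])
--         if sorted(arr_q) == sorted(responses_text):
--             temp.append(el)
--     return temp
-- ===== SOURCE B (Python) =====
-- def find_data_by_questions(arr_q, data):
--     target = {}
--     for q in arr_q:
--         target[q] = target.get(q, 0) + 1
--     out = []
--     for el in data:
--         counts = {}
--         for r in el["response"]:
--             t = r["text"]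
--             counts[t] = counts.get(t, 0) + 1
--         if counts == target:
--             out.append(el)
--     return out
-- ===== Notes on version B (the rewrite author's own statement) =====
-- stated objective: alternative
-- what changed: Replaces the per-element double sort-and-compare with hash-based frequency dicts: the query multiset is built once as a dict of counts before the loop and each element's response texts are counted in one pass, filtering by dict equality.
import Mathlib
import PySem

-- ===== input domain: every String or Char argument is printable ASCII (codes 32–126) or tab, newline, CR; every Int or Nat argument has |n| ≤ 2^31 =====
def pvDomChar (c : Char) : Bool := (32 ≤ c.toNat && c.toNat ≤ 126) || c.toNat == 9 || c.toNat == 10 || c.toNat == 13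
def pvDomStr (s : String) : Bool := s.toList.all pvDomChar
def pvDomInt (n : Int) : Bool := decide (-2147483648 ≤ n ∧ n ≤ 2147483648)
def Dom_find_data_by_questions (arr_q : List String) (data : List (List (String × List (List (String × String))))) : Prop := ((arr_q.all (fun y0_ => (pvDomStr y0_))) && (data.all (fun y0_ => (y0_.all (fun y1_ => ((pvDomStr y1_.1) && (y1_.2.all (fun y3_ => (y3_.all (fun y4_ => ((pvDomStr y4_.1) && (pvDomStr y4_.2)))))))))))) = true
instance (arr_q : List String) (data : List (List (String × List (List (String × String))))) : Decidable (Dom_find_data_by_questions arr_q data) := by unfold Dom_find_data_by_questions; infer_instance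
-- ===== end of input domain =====

-- B replaces A's per-element double sort-and-compare with count dictionaries (query counts built
-- once before the loop); alternative data structure, same results. No argument is mutated.

-- dict lookup on an association list: first match (the type convention's lookup rule)
def pvLookup {a : Type} (el : List (String × a)) (k : String) : Option a :=
  (el.find? (fun p => p.1 == k)).map (·.2)

-- ===== PORT A =====
def find_data_by_questions (arr_q : List String) (data : List (List (String × List (List (String × String))))) : List (List (String × List (List (String × String)))) :=
  data.foldl (fun temp el =>
    let responses_text : List String :=
      ((pvLookup el "response").getD []).foldl
        (fun acc r_el => acc ++ [(pvLookup r_el "text").getD ""]) []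
    if PySem.List.sorted arr_q (fun x => x) false
         = PySem.List.sorted responses_text (fun x => x) false
    then temp ++ [el] else temp) []

-- ===== PORT B =====
-- counts[t] = counts.get(t, 0) + 1 loop
def pvCountDict (xs : List String) : PySem.Dict String Int :=
  xs.foldl (fun d x => d.insert x (d.getD x 0 + 1)) PySem.Dict.empty

-- Python dict == : order-independent key/value agreement
def pvDictEq (d e : PySem.Dict String Int) : Bool :=
  d.items.all (fun kv => e.get? kv.1 == some kv.2)
    && e.items.all (fun kv => d.get? kv.1 == some kv.2)

def find_data_by_questions_alt (arr_q : List String) (data : List (List (String × List (List (String × String))))) : List (List (String × List (List (String × String)))) :=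
  let target := pvCountDict arr_q
  data.foldl (fun out el =>
    let counts : PySem.Dict String Int :=
      ((pvLookup el "response").getD []).foldl
        (fun d r => let t := (pvLookup r "text").getD ""
                    d.insert t (d.getD t 0 + 1)) PySem.Dict.empty
    if pvDictEq counts target then out ++ [el] else out) []

-- ===== PRECONDITION & SPEC =====
-- Pre_ excludes exactly the inputs where Python A raises KeyError: an element of data
-- without a "response" key, or a response entry without a "text" key.
def Pre_find_data_by_questions (_arr_q : List String) (data : List (List (String × List (List (String × String))))) : Prop :=
  ∀ el ∈ data, (pvLookup el "response").isSome = true ∧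
    ∀ r ∈ (pvLookup el "response").getD [], (pvLookup r "text").isSome = true
instance (arr_q : List String) (data : List (List (String × List (List (String × String))))) : Decidable (Pre_find_data_by_questions arr_q data) := by unfold Pre_find_data_by_questions; infer_instance

def pvWitness_find_data_by_questions : List String × (List (List (String × List (List (String × String))))) :=
  (["a", "b"], [[("response", [[("text", "b")], [("text", "a")]])], [("response", [[("text", "c")]])]])

def Spec_find_data_by_questions (arr_q : List String) (data : List (List (String × List (List (String × String))))) (out : List (List (String × List (List (String × String))))) : Prop := out = find_data_by_questions_alt arr_q data
instance (arr_q : List String) (data : List (List (String × List (List (String × String))))) (out : List (List (String × List (List (String × String))))) : Decidable (Spec_find_data_by_questions arr_q data out) := by unfold Spec_find_data_by_questions; infer_instance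

-- ===== CLAIM (what is proved, stated in full; the proofs are below) =====
def Claim_equal_find_data_by_questions : Prop := ∀ (arr_q : List String) (data : List (List (String × List (List (String × String))))), Dom_find_data_by_questions arr_q data → Pre_find_data_by_questions arr_q data → Spec_find_data_by_questions arr_q data (find_data_by_questions arr_q data)

-- ===== LEMMAS AND PROOFS =====

-- pvDictEq on two counters is exactly equality of all multiplicities
lemma pvDictEq_counter_iff (a b : List String) :
    pvDictEq (PySem.Dict.counter a) (PySem.Dict.counter b) = true ↔ ∀ v, List.count v a = List.count v b := by
  unfold pvDictEq
  simp only [Bool.and_eq_true, List.all_eq_true, beq_iff_eq,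
    PySem.Dict.get?_eq_some_iff_mem_items _ _ _ (PySem.Dict.nodup_keys_counter _),
    PySem.Dict.items_counter, List.mem_map, PySem.Set.mem_ofList]
  constructor
  · rintro ⟨h1, h2⟩ v
    by_cases hva : v ∈ a
    · obtain ⟨k, hk, hkeq⟩ := h1 _ ⟨v, hva, rfl⟩
      obtain ⟨h1', h2'⟩ := Prod.mk.injEq .. ▸ hkeq
      subst h1'
      simp only at h2'
      exact_mod_cast h2'.symm
    · by_cases hvb : v ∈ b
      · obtain ⟨k, hk, hkeq⟩ := h2 _ ⟨v, hvb, rfl⟩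
        obtain ⟨h1', h2'⟩ := Prod.mk.injEq .. ▸ hkeq
        subst h1'
        simp only at h2'
        exact_mod_cast h2'
      · simp [List.count_eq_zero_of_not_mem hva, List.count_eq_zero_of_not_mem hvb]
  · intro h
    refine ⟨?_, ?_⟩
    · rintro kv ⟨v, hv, rfl⟩
      refine ⟨v, ?_, by rw [h v]⟩
      have : 0 < List.count v b := (h v) ▸ List.count_pos_iff.mpr hv
      exact List.count_pos_iff.mp this
    · rintro kv ⟨v, hv, rfl⟩
      refine ⟨v, ?_, by rw [h v]⟩
      have : 0 < List.count v a := (h v).symm ▸ List.count_pos_iff.mpr hv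
      exact List.count_pos_iff.mp this

-- B's counting loop over the responses is the counter of the text list A builds
lemma counts_eq_counter (resp : List (List (String × String))) :
    resp.foldl (fun (d : PySem.Dict String Int) r =>
        let t := (pvLookup r "text").getD ""
        d.insert t (d.getD t 0 + 1)) PySem.Dict.empty
      = PySem.Dict.counter (resp.map (fun r => (pvLookup r "text").getD "")) := by
  rw [← PySem.Dict.foldl_insert_getD_add_one_eq_counter, List.foldl_map]

-- the two per-element tests agree
lemma cond_eq (arr_q : List String) (resp : List (List (String × String))) :
    (PySem.List.sorted arr_q (fun x => x) false
       = PySem.List.sorted (resp.foldl (fun acc r_el => acc ++ [(pvLookup r_el "text").getD ""]) []) (fun x => x) false)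
    ↔ pvDictEq (resp.foldl (fun (d : PySem.Dict String Int) r =>
          let t := (pvLookup r "text").getD ""
          d.insert t (d.getD t 0 + 1)) PySem.Dict.empty)
        (pvCountDict arr_q) = true := by
  rw [PySem.List.foldl_append_singleton_eq_map (fun r_el => (pvLookup r_el "text").getD "") resp [],
    List.nil_append, counts_eq_counter, PySem.List.sorted_id_eq_sorted_id_iff_perm,
    List.perm_iff_count]
  rw [show pvCountDict arr_q = PySem.Dict.counter arr_q from
    PySem.Dict.foldl_insert_getD_add_one_eq_counter arr_q, pvDictEq_counter_iff]
  constructor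
  · intro h v; exact (h v).symm
  · intro h v; exact (h v).symm

-- ===== VERDICT (by name: the statement is the Claim_ definition above) =====
theorem find_data_by_questions_spec : Claim_equal_find_data_by_questions := by
  intro arr_q data _ _
  unfold Spec_find_data_by_questions find_data_by_questions find_data_by_questions_alt
  rw [show
    (fun (temp : List (List (String × List (List (String × String))))) el =>
      let responses_text : List String :=
        ((pvLookup el "response").getD []).foldl
          (fun acc r_el => acc ++ [(pvLookup r_el "text").getD ""]) []
      if PySem.List.sorted arr_q (fun x => x) false
           = PySem.List.sorted responses_text (fun x => x) false
      then temp ++ [el] else temp)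
    = (fun (out : List (List (String × List (List (String × String))))) el =>
      let counts : PySem.Dict String Int :=
        ((pvLookup el "response").getD []).foldl
          (fun d r => let t := (pvLookup r "text").getD ""
                      d.insert t (d.getD t 0 + 1)) PySem.Dict.empty
      if pvDictEq counts (pvCountDict arr_q) then out ++ [el] else out)
    from funext fun temp => funext fun el =>
      if_congr (cond_eq arr_q ((pvLookup el "response").getD [])) rfl rfl]
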